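-- pv_equiv track=rewrite | github.com/Stettzy/youtube_keywords_blocker | problematic_code.py | complex_method
-- ===== SOURCE A (Python) =====
-- def complex_method(a, b, c, d, e):  # Too many parameters
--     """This method is too complex."""
--     result = 0
--     # Overly complex code with deep nesting
--     for i in range(a):
--         for j in range(b):
--             for k in range(c):
--                 if i > j:
--                     if j > k:
--                         if i % 2 == 0:
--                             if j % 2 == 0:
--                                 result += i * j * k
--     return result
-- ===== SOURCE B (Python) =====
-- def complex_method(a, b, c, d, e):
--     """Same sum, computed in O(b) with closed forms for the i- and k-loops."""
--     if a <= 0 or b <= 0 or c <= 0: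
--         return 0
--     m = (a + 1) // 2              # number of even i in [0, a)
--     sum_evens_lt_a = m * (m - 1)  # sum of even i in [0, a)
--     total = 0
--     for j in range(0, min(b, a), 2):     # only even j < min(b, a) can contribute
--         h = j // 2
--         si = sum_evens_lt_a - h * (h + 1)      # sum of even i with j < i < a
--         kmax = min(j, c)
--         tk = kmax * (kmax - 1) // 2            # sum of k with k < j and k < c
--         total += j * si * tk
--     return total
-- ===== Notes on version B (the rewrite author's own statement) =====
-- stated objective: faster
-- what changed: A's O(a*b*c) triple nested loop is replaced by a single loop over even j < min(b,a) that multiplies j by closed-form sums (triangular numbers) for the even-i suffix sum and the k-sum.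
import Mathlib
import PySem

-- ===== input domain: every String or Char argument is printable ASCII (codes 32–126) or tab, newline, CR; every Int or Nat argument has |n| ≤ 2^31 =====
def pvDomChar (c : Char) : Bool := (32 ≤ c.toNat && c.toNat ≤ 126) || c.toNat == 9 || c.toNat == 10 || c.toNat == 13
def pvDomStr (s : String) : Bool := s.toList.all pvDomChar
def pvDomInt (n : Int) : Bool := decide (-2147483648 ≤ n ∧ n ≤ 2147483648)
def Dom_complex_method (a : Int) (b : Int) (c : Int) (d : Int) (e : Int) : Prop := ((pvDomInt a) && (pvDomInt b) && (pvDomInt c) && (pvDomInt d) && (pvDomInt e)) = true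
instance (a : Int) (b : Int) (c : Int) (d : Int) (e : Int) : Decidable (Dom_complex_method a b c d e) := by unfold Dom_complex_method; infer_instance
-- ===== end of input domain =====

-- B replaces A's O(a*b*c) triple loop by one O(b) loop over even j with closed forms
-- for the i- and k-sums (objective: faster, asymptotic).
-- ===== PORT A =====
def complex_method (a : Int) (b : Int) (c : Int) (d : Int) (e : Int) : Int :=
  (PySem.List.pyRange 0 a 1).foldl (fun result i =>
    (PySem.List.pyRange 0 b 1).foldl (fun result j =>
      (PySem.List.pyRange 0 c 1).foldl (fun result k =>
        if i > j then
          if j > k then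
            if PySem.Int.mod i 2 = 0 then
              if PySem.Int.mod j 2 = 0 then result + i * j * k
              else result
            else result
          else result
        else result) result) result) 0

-- ===== PORT B =====
def complex_method_alt (a : Int) (b : Int) (c : Int) (d : Int) (e : Int) : Int :=
  if a ≤ 0 ∨ b ≤ 0 ∨ c ≤ 0 then 0
  else
    let m := PySem.Int.floordiv (a + 1) 2
    let sumEvensLtA := m * (m - 1)
    (PySem.List.pyRange 0 (min b a) 2).foldl (fun total j =>
      let h := PySem.Int.floordiv j 2
      let si := sumEvensLtA - h * (h + 1)
      let kmax := min j c
      let tk := PySem.Int.floordiv (kmax * (kmax - 1)) 2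
      total + j * si * tk) 0

-- ===== PRECONDITION & SPEC =====
def Spec_complex_method (a : Int) (b : Int) (c : Int) (d : Int) (e : Int) (out : Int) : Prop := out = complex_method_alt a b c d e
instance (a : Int) (b : Int) (c : Int) (d : Int) (e : Int) (out : Int) : Decidable (Spec_complex_method a b c d e out) := by unfold Spec_complex_method; infer_instance

-- ===== CLAIM (what is proved, stated in full; the proofs are below) =====
def Claim_equal_complex_method : Prop := ∀ (a : Int) (b : Int) (c : Int) (d : Int) (e : Int), Dom_complex_method a b c d e → Spec_complex_method a b c d e (complex_method a b c d e)

-- ===== LEMMAS AND PROOFS =====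

-- triple sum characterising A's loops (nat indices, Int values)
def pvG (na nb nc : Nat) : Int :=
  ∑ i ∈ Finset.range na, ∑ j ∈ Finset.range nb, ∑ k ∈ Finset.range nc,
    if j < i ∧ k < j ∧ i % 2 = 0 ∧ j % 2 = 0 then (i : Int) * j * k else 0

-- sum of even numbers below n
def pvSE (n : Nat) : Int := ∑ i ∈ Finset.range n, if i % 2 = 0 then (i : Int) else 0

-- triangular number 0 + 1 + ... + (m-1)
def pvTri (m : Nat) : Int := ((m : Int) * (m - 1)) / 2

theorem pv_sum_map_range (n : Nat) (f : Nat → Int) :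
    ((List.range n).map f).sum = ∑ i ∈ Finset.range n, f i := by
  induction n with
  | zero => simp
  | succ n ih => rw [List.range_succ, Finset.sum_range_succ]; simp [ih]

theorem pv_mod_two (i : Nat) : PySem.Int.mod (i : Int) 2 = ((i % 2 : Nat) : Int) := by
  exact_mod_cast PySem.Int.mod_natCast i 2

theorem pv_A_eq (a b c d e : Int) :
    complex_method a b c d e = pvG a.toNat b.toNat c.toNat := by
  have hK : ∀ (nc : Nat) (i j : Nat) (r : Int),
      (List.range nc).foldl (fun result k =>
        if (i : Int) > (j : Int) then
          if (j : Int) > ((k : Nat) : Int) then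
            if PySem.Int.mod (i : Int) 2 = 0 then
              if PySem.Int.mod (j : Int) 2 = 0 then result + (i : Int) * j * k
              else result
            else result
          else result
        else result) r
      = r + ∑ k ∈ Finset.range nc,
          (if j < i ∧ k < j ∧ i % 2 = 0 ∧ j % 2 = 0 then (i : Int) * j * k else 0) := by
    intro nc i j r
    have hstep : (fun (result : Int) (k : Nat) =>
        if (i : Int) > (j : Int) then
          if (j : Int) > ((k : Nat) : Int) then
            if PySem.Int.mod (i : Int) 2 = 0 then
              if PySem.Int.mod (j : Int) 2 = 0 then result + (i : Int) * j * k
              else result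
            else result
          else result
        else result)
        = (fun (result : Int) (k : Nat) => result +
            if j < i ∧ k < j ∧ i % 2 = 0 ∧ j % 2 = 0 then (i : Int) * j * k else 0) := by
      funext result k
      simp only [gt_iff_lt, Nat.cast_lt, pv_mod_two, Nat.cast_eq_zero]
      split_ifs <;> first | rfl | omega
    rw [hstep, PySem.List.foldl_add, pv_sum_map_range]
  simp only [complex_method, PySem.List.pyRange_zero, List.foldl_map]
  simp only [hK]
  have hJ : ∀ (nb nc : Nat) (i : Nat) (r : Int),
      (List.range nb).foldl (fun result j => result +
          ∑ k ∈ Finset.range nc, (if j < i ∧ k < j ∧ i % 2 = 0 ∧ j % 2 = 0 then (i : Int) * j * k else 0)) r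
      = r + ∑ j ∈ Finset.range nb, ∑ k ∈ Finset.range nc,
          (if j < i ∧ k < j ∧ i % 2 = 0 ∧ j % 2 = 0 then (i : Int) * j * k else 0) := by
    intro nb nc i r
    rw [PySem.List.foldl_add, pv_sum_map_range]
  simp only [hJ]
  rw [PySem.List.foldl_add, pv_sum_map_range, zero_add]
  rfl

theorem pv_SE_closed (n : Nat) : pvSE n = (((n + 1) / 2 : Nat) : Int) * (((n + 1) / 2 : Nat) - 1) := by
  induction n with
  | zero => simp [pvSE]
  | succ n ih =>
    rw [pvSE, Finset.sum_range_succ, ← pvSE, ih]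
    rcases Nat.even_or_odd n with ⟨p, hp⟩ | ⟨p, hp⟩
    · subst hp
      have h1 : (p + p + 1) / 2 = p := by omega
      have h2 : (p + p + 1 + 1) / 2 = p + 1 := by omega
      rw [h1, h2, if_pos (by omega)]
      push_cast; ring
    · subst hp
      have h1 : (2 * p + 1 + 1) / 2 = p + 1 := by omega
      have h2 : (2 * p + 1 + 1 + 1) / 2 = p + 1 := by omega
      rw [h1, h2, if_neg (by omega)]
      ring

theorem pv_sumK (j nc : Nat) :
    (∑ k ∈ Finset.range nc, if k < j then (k : Int) else 0) = pvTri (min j nc) := by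
  have key : 2 * (∑ k ∈ Finset.range nc, if k < j then (k : Int) else 0)
      = ((min j nc : Nat) : Int) * ((min j nc : Nat) - 1) := by
    induction nc with
    | zero => simp
    | succ nc ih =>
      rw [Finset.sum_range_succ]
      by_cases h : nc < j
      · rw [if_pos h]
        have hm : min j (nc + 1) = nc + 1 := by omega
        have hm2 : min j nc = nc := by omega
        rw [hm]; rw [hm2] at ih
        push_cast at ih ⊢
        linear_combination ih
      · rw [if_neg h]
        have hm : min j (nc + 1) = min j nc := by omega
        rw [hm, add_zero, ih]
  have h2 : (0:Int) ≤ (min j nc : Int) := by positivity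
  rw [pvTri]
  omega

theorem pv_sumI (j na : Nat) (h : j < na) :
    (∑ i ∈ Finset.range na, if j < i ∧ i % 2 = 0 then (i : Int) else 0) = pvSE na - pvSE (j + 1) := by
  have hsplit : ∀ (f : Nat → Int), (∑ i ∈ Finset.range na, f i)
      = (∑ i ∈ Finset.range (j+1), f i) + ∑ i ∈ Finset.Ico (j+1) na, f i := by
    intro f
    simp only [Finset.range_eq_Ico]
    exact (Finset.sum_Ico_consecutive f (by omega) (by omega)).symm
  have h1 : (∑ i ∈ Finset.range (j+1), if j < i ∧ i % 2 = 0 then (i : Int) else 0) = 0 := by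
    apply Finset.sum_eq_zero
    intro i hi
    rw [Finset.mem_range] at hi
    rw [if_neg (by omega)]
  have h2 : (∑ i ∈ Finset.Ico (j+1) na, if j < i ∧ i % 2 = 0 then (i : Int) else 0)
      = ∑ i ∈ Finset.Ico (j+1) na, if i % 2 = 0 then (i : Int) else 0 := by
    apply Finset.sum_congr rfl
    intro i hi
    rw [Finset.mem_Ico] at hi
    by_cases he : i % 2 = 0
    · rw [if_pos ⟨by omega, he⟩, if_pos he]
    · rw [if_neg (by tauto), if_neg he]
  have h4 : pvSE na = pvSE (j+1) + ∑ i ∈ Finset.Ico (j+1) na, if i % 2 = 0 then (i : Int) else 0 := by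
    rw [pvSE, pvSE]; exact hsplit _
  rw [hsplit, h1, zero_add, h2, h4]; ring

theorem pv_even_reindex (M : Nat) (F : Nat → Int) :
    (∑ j ∈ Finset.range M, if j % 2 = 0 then F j else 0)
      = ∑ t ∈ Finset.range ((M + 1) / 2), F (2 * t) := by
  induction M with
  | zero => simp
  | succ M ih =>
    rw [Finset.sum_range_succ, ih]
    rcases Nat.even_or_odd M with ⟨p, hp⟩ | ⟨p, hp⟩
    · subst hp
      have h1 : (p + p + 1) / 2 = p := by omega
      have h2 : (p + p + 1 + 1) / 2 = p + 1 := by omega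
      have h3 : p + p = 2 * p := by omega
      rw [h1, h2, if_pos (by omega), Finset.sum_range_succ, h3]
    · subst hp
      have h1 : (2 * p + 1 + 1) / 2 = p + 1 := by omega
      have h2 : (2 * p + 1 + 1 + 1) / 2 = p + 1 := by omega
      rw [h1, h2, if_neg (by omega), add_zero]

theorem pv_G_split (na nb nc : Nat) :
    pvG na nb nc = ∑ j ∈ Finset.range nb,
      (if j % 2 = 0 then
        (∑ i ∈ Finset.range na, if j < i ∧ i % 2 = 0 then (i : Int) else 0) * j
          * (∑ k ∈ Finset.range nc, if k < j then (k : Int) else 0)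
       else 0) := by
  rw [pvG, Finset.sum_comm]
  apply Finset.sum_congr rfl
  intro j _
  by_cases hj : j % 2 = 0
  · rw [if_pos hj]
    have hterm : ∀ i k : Nat, (if j < i ∧ k < j ∧ i % 2 = 0 ∧ j % 2 = 0 then (i : Int) * j * k else 0)
        = (if j < i ∧ i % 2 = 0 then (i : Int) else 0) * j * (if k < j then (k : Int) else 0) := by
      intro i k
      split_ifs <;> (first | (exfalso; omega) | ring)
    simp only [hterm]
    simp only [← Finset.mul_sum, ← Finset.sum_mul]
  · rw [if_neg hj]
    apply Finset.sum_eq_zero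
    intro i _
    apply Finset.sum_eq_zero
    intro k _
    rw [if_neg (by tauto)]

theorem pv_G_closed (na nb nc : Nat) :
    pvG na nb nc = ∑ t ∈ Finset.range ((min nb na + 1) / 2),
      (pvSE na - pvSE (2 * t + 1)) * ((2 * t : Nat) : Int) * pvTri (min (2 * t) nc) := by
  rw [pv_G_split]
  have hrestrict : (∑ j ∈ Finset.range nb,
      (if j % 2 = 0 then
        (∑ i ∈ Finset.range na, if j < i ∧ i % 2 = 0 then (i : Int) else 0) * j
          * (∑ k ∈ Finset.range nc, if k < j then (k : Int) else 0)
       else 0))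
      = ∑ j ∈ Finset.range (min nb na),
      (if j % 2 = 0 then
        (∑ i ∈ Finset.range na, if j < i ∧ i % 2 = 0 then (i : Int) else 0) * j
          * (∑ k ∈ Finset.range nc, if k < j then (k : Int) else 0)
       else 0) := by
    rcases le_total nb na with h | h
    · rw [min_eq_left h]
    · rw [min_eq_right h]
      simp only [Finset.range_eq_Ico]
      rw [← Finset.sum_Ico_consecutive _ (Nat.zero_le na) h]
      have hzero : (∑ j ∈ Finset.Ico na nb,
          (if j % 2 = 0 then
            (∑ i ∈ Finset.Ico 0 na, if j < i ∧ i % 2 = 0 then (i : Int) else 0) * j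
              * (∑ k ∈ Finset.Ico 0 nc, if k < j then (k : Int) else 0)
           else 0)) = 0 := by
        apply Finset.sum_eq_zero
        intro j hj
        rw [Finset.mem_Ico] at hj
        have hSI : (∑ i ∈ Finset.Ico 0 na, if j < i ∧ i % 2 = 0 then (i : Int) else 0) = 0 := by
          apply Finset.sum_eq_zero
          intro i hi
          rw [Finset.mem_Ico] at hi
          rw [if_neg (by omega)]
        rw [hSI, zero_mul, zero_mul]
        split_ifs <;> rfl
      rw [hzero, add_zero]
  rw [hrestrict]
  have hcongr : ∀ j ∈ Finset.range (min nb na),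
      (if j % 2 = 0 then
        (∑ i ∈ Finset.range na, if j < i ∧ i % 2 = 0 then (i : Int) else 0) * j
          * (∑ k ∈ Finset.range nc, if k < j then (k : Int) else 0)
       else 0)
      = (if j % 2 = 0 then (pvSE na - pvSE (j + 1)) * ((j : Nat) : Int) * pvTri (min j nc) else 0) := by
    intro j hj
    rw [Finset.mem_range] at hj
    by_cases he : j % 2 = 0
    · rw [if_pos he, if_pos he, pv_sumI j na (by omega), pv_sumK]
    · rw [if_neg he, if_neg he]
  rw [Finset.sum_congr rfl hcongr, pv_even_reindex (min nb na)
    (fun j => (pvSE na - pvSE (j + 1)) * ((j : Nat) : Int) * pvTri (min j nc))]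

theorem pv_B_eq (a b c d e : Int) (ha : 1 ≤ a) (hb : 1 ≤ b) (hc : 1 ≤ c) :
    complex_method_alt a b c d e = ∑ t ∈ Finset.range ((min b.toNat a.toNat + 1) / 2),
      (pvSE a.toNat - pvSE (2 * t + 1)) * ((2 * t : Nat) : Int) * pvTri (min (2 * t) c.toNat) := by
  rw [complex_method_alt, if_neg (by omega)]
  have hminba : min b a = ((min b.toNat a.toNat : Nat) : Int) := by
    rw [Nat.cast_min]
    omega
  rw [hminba, PySem.List.pyRange_of_pos _ _ (by norm_num : (0:Int) < 2)]
  rw [if_pos (by omega)]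
  have hcnt : ((((min b.toNat a.toNat : Nat) : Int) - 0 + 2 - 1) / 2).toNat
      = (min b.toNat a.toNat + 1) / 2 := by
    omega
  rw [hcnt, List.foldl_map]
  simp only []
  rw [show (fun (total : Int) (k : Nat) =>
        total + (0 + 2 * (k:Int)) *
          (PySem.Int.floordiv ((a:Int) + 1) 2 * (PySem.Int.floordiv (a + 1) 2 - 1) -
            PySem.Int.floordiv (0 + 2 * (k:Int)) 2 * (PySem.Int.floordiv (0 + 2 * (k:Int)) 2 + 1)) *
          PySem.Int.floordiv (min (0 + 2 * (k:Int)) c * (min (0 + 2 * (k:Int)) c - 1)) 2)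
      = (fun total k => total +
          (pvSE a.toNat - pvSE (2 * k + 1)) * ((2 * k : Nat) : Int) * pvTri (min (2 * k) c.toNat)) from ?_]
  · rw [PySem.List.foldl_add, pv_sum_map_range, zero_add]
  · funext total t
    congr 1
    have hfd : ∀ x : Int, PySem.Int.floordiv x 2 = x / 2 :=
      fun x => PySem.Int.floordiv_eq_ediv_of_pos (by norm_num)
    have hm : PySem.Int.floordiv (a + 1) 2 = (((a.toNat + 1) / 2 : Nat) : Int) := by
      rw [hfd]; omega
    have hh : PySem.Int.floordiv (0 + 2 * (t:Int)) 2 = (t : Int) := by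
      rw [hfd]; omega
    have hkmax : min (0 + 2 * (t:Int)) c = ((min (2 * t) c.toNat : Nat) : Int) := by
      rw [Nat.cast_min]; push_cast; omega
    have htk : PySem.Int.floordiv (((min (2 * t) c.toNat : Nat) : Int) * (((min (2 * t) c.toNat : Nat) : Int) - 1)) 2
        = pvTri (min (2 * t) c.toNat) := by
      rw [hfd, pvTri]
    have hse1 : pvSE (2 * t + 1) = (t : Int) * ((t : Int) + 1) := by
      rw [pv_SE_closed]
      have : (2 * t + 1 + 1) / 2 = t + 1 := by omega
      rw [this]; push_cast; ring
    rw [hm, hh, hkmax, htk, pv_SE_closed a.toNat, hse1]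
    push_cast
    ring

-- ===== VERDICT (by name: the statement is the Claim_ definition above) =====
theorem complex_method_spec : Claim_equal_complex_method := by
  intro a b c d e _
  unfold Spec_complex_method
  rw [pv_A_eq]
  by_cases hg : a ≤ 0 ∨ b ≤ 0 ∨ c ≤ 0
  · rw [complex_method_alt, if_pos hg]
    rcases hg with h | h | h
    · simp [pvG, Int.toNat_of_nonpos h]
    · simp [pvG, Int.toNat_of_nonpos h]
    · simp [pvG, Int.toNat_of_nonpos h]
  · have ha : 1 ≤ a := by omega
    have hb : 1 ≤ b := by omega
    have hc : 1 ≤ c := by omega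
    rw [pv_G_closed, pv_B_eq a b c d e ha hb hc]
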